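-- pv_equiv track=rewrite | github.com/llwasampijja/ireporter-challenge-two | app/models/incident_model.py | validate_incident
-- ===== SOURCE A (Python) =====
-- def validate_incident(request_data):
--     """this method checks if a request contains all and only required fields"""
--     minimum_turple = (
--         "location",
--         "videos",
--         "images",
--         "title",
--         "comment"
--     )
--
--     if any(item not in request_data for item in minimum_turple) \
--     or any(item not in minimum_turple for item in request_data):
--         return True
--     return False
-- ===== SOURCE B (Python) =====
-- def validate_incident(request_data):
--     """this method checks if a request contains all and only required fields"""
--     required = ("location", "videos", "images", "title", "comment")
--     seen = 0
--     for key in request_data: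
--         try:
--             i = required.index(key)
--         except ValueError:
--             return True
--         seen |= 1 << i
--     return seen != 0b11111
-- ===== Notes on version B (the rewrite author's own statement) =====
-- stated objective: alternative
-- what changed: Replaced A's two staged any-membership scans with a single pass over the request keys that early-returns on an unknown key and accumulates a bitmask of which required fields were seen, checking the mask against full coverage at the end.
import Mathlib
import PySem

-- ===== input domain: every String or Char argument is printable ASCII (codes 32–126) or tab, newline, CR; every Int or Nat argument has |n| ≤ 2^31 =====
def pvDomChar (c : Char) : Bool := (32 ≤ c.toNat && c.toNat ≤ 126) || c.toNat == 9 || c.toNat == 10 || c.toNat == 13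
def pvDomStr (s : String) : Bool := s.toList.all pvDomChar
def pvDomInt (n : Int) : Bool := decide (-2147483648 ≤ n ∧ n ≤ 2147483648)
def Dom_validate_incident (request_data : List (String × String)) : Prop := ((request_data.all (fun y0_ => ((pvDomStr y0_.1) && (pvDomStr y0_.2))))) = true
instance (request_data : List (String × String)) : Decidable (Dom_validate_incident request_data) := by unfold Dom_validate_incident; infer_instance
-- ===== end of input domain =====

-- B replaces A's two staged membership scans with a single pass over the request keys that
-- early-returns on an unknown key and accumulates a bitmask of seen required fields (alternative).
-- ===== PORT A =====
def validate_incident (request_data : List (String × String)) : Bool :=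
  let minimum_turple : List String := ["location", "videos", "images", "title", "comment"]
  -- 'item not in request_data' on a dict tests the keys
  if minimum_turple.any (fun item => !((request_data.map Prod.fst).contains item))
      || (request_data.map Prod.fst).any (fun item => !(minimum_turple.contains item)) then
    true
  else
    false

-- ===== PORT B =====
def pvRequired : List String := ["location", "videos", "images", "title", "comment"]

-- the for-loop of Source B: early return True on a key outside required, else OR the key's bit in
def pvScan : List String → Nat → Bool
  | [], seen => seen != 31
  | k :: rest, seen =>
    match PySem.List.index? pvRequired k with
    | none => true
    | some i => pvScan rest (seen ||| (1 <<< i))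

def validate_incident_alt (request_data : List (String × String)) : Bool :=
  pvScan (request_data.map Prod.fst) 0

-- ===== PRECONDITION & SPEC =====
def Spec_validate_incident (request_data : List (String × String)) (out : Bool) : Prop := out = validate_incident_alt request_data
instance (request_data : List (String × String)) (out : Bool) : Decidable (Spec_validate_incident request_data out) := by unfold Spec_validate_incident; infer_instance

-- ===== CLAIM (what is proved, stated in full; the proofs are below) =====
def Claim_equal_validate_incident : Prop := ∀ (request_data : List (String × String)), Dom_validate_incident request_data → Spec_validate_incident request_data (validate_incident request_data)

-- ===== LEMMAS AND PROOFS =====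

-- pvScan returns false iff every key is a required field and the bits accumulated so far
-- together with the keys still to scan cover all five required fields
theorem pvScan_false (ks : List String) (seen : Nat) (hseen : seen < 32) :
    pvScan ks seen = false ↔
      ((∀ k ∈ ks, k ∈ pvRequired) ∧
        ∀ j : Fin 5, seen.testBit j = true ∨ pvRequired.getD j "" ∈ ks) := by
  induction ks generalizing seen with
  | nil =>
    simp only [pvScan, List.mem_nil_iff, or_false]
    constructor
    · intro h
      refine ⟨by simp, ?_⟩
      have h31 : seen = 31 := by
        by_contra hne
        simp [hne] at h
      intro j
      subst h31
      fin_cases j <;> decide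
    · rintro ⟨-, h⟩
      have : seen = 31 := by
        interval_cases seen <;> first | rfl | (exfalso; revert h; decide)
      simp [this]
  | cons k rest ih =>
    simp only [pvScan]
    rcases hidx : PySem.List.index? pvRequired k with _ | i
    · have hk : k ∉ pvRequired := Iff.mp (PySem.List.index?_eq_none_iff pvRequired k) hidx
      constructor
      · intro h; exact absurd h (by simp)
      · rintro ⟨hall, -⟩
        exact absurd (hall k (List.mem_cons_self)) hk
    · obtain ⟨hi, hki, hfirst⟩ := PySem.List.getElem_of_index?_eq_some hidx
      have hi5 : i < 5 := hi
      have hlt : seen ||| (1 <<< i) < 32 := by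
        have h1 : (1 <<< i) < 32 := by
          have : (2:Nat)^i ≤ 2^4 := Nat.pow_le_pow_right (by norm_num) (by omega)
          simpa [Nat.shiftLeft_eq, Nat.one_mul] using lt_of_le_of_lt this (by norm_num)
        exact Nat.or_lt_two_pow (n := 5) hseen h1
      rw [ih _ hlt]
      have hnodup : pvRequired.Nodup := by decide
      constructor
      · rintro ⟨hall, hcov⟩
        refine ⟨?_, ?_⟩
        · intro x hx
          rcases List.mem_cons.mp hx with rfl | hx
          · exact hki ▸ List.getElem_mem hi
          · exact hall x hx
        · intro j
          rcases hcov j with hb | hm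
          · rw [Nat.testBit_or] at hb
            rcases Bool.or_eq_true_iff.mp hb with hb | hb
            · exact Or.inl hb
            · -- bit j of 1 <<< i set means j = i, so the key k = pvRequired[i] covers j
              have hji : (j : Nat) = i := by
                rw [Nat.shiftLeft_eq, Nat.one_mul, Nat.testBit_two_pow] at hb
                exact (of_decide_eq_true hb).symm
              refine Or.inr (List.mem_cons.mpr (Or.inl ?_))
              have hgd : pvRequired.getD (j:Nat) "" = pvRequired[i] := by
                rw [hji]; exact List.getD_eq_getElem _ _ hi
              exact hgd.trans hki
          · exact Or.inr (List.mem_cons.mpr (Or.inr hm))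
      · rintro ⟨hall, hcov⟩
        refine ⟨fun x hx => hall x (List.mem_cons_of_mem _ hx), ?_⟩
        intro j
        rcases hcov j with hb | hm
        · left; rw [Nat.testBit_or, hb]; rfl
        · rcases List.mem_cons.mp hm with hjk | hjr
          · -- the key k covers field j: then j = i and the new bit is set
            left
            have hj5 : (j:Nat) < pvRequired.length := by
              have := j.isLt; simp only [pvRequired, List.length_cons, List.length_nil]; omega
            have hji : (j : Nat) = i := by
              have hgj : pvRequired[(j:Nat)] = k := by
                rw [← List.getD_eq_getElem _ "" hj5]; exact hjk
              exact (List.Nodup.getElem_inj_iff hnodup).mp (hgj.trans hki.symm)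
            rw [Nat.testBit_or, Nat.shiftLeft_eq, Nat.one_mul, Nat.testBit_two_pow]
            simp [hji]
          · exact Or.inr hjr

-- ===== VERDICT (by name: the statement is the Claim_ definition above) =====
theorem validate_incident_spec : Claim_equal_validate_incident := by
  intro rd _
  unfold Spec_validate_incident validate_incident validate_incident_alt
  set ks := rd.map Prod.fst with hks
  show (if ((pvRequired.any fun item => !ks.contains item)
        || ks.any fun item => !pvRequired.contains item) = true then true else false)
      = pvScan ks 0
  have hB := pvScan_false ks 0 (by norm_num)
  cases hs : pvScan ks 0 with
  | false =>
    obtain ⟨hsub, hcov⟩ := hB.mp hs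
    have hmem : ∀ j : Fin 5, pvRequired.getD (j:Nat) "" ∈ ks := by
      intro j
      rcases hcov j with hb | hm
      · exact absurd hb (by simp)
      · exact hm
    rw [if_neg]
    intro hc
    rcases Bool.or_eq_true_iff.mp hc with hc | hc
    · simp only [List.any_eq_true, List.contains_eq_mem, Bool.not_eq_true',
        decide_eq_false_iff_not] at hc
      obtain ⟨item, hitem, hnot⟩ := hc
      apply hnot
      simp only [pvRequired] at hitem
      fin_cases hitem
      · exact hmem 0
      · exact hmem 1
      · exact hmem 2
      · exact hmem 3
      · exact hmem 4
    · simp only [List.any_eq_true, List.contains_eq_mem, Bool.not_eq_true',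
        decide_eq_false_iff_not] at hc
      obtain ⟨x, hx, hnx⟩ := hc
      exact hnx (hsub x hx)
  | true =>
    have hcond : ((pvRequired.any fun item => !ks.contains item)
        || ks.any fun item => !pvRequired.contains item) = true := by
      by_cases hex : ∃ x ∈ ks, x ∉ pvRequired
      · refine Bool.or_eq_true_iff.mpr (Or.inr ?_)
        simp only [List.any_eq_true, List.contains_eq_mem, Bool.not_eq_true',
          decide_eq_false_iff_not]
        obtain ⟨x, hx, hnx⟩ := hex
        exact ⟨x, hx, hnx⟩
      · have hsub : ∀ x ∈ ks, x ∈ pvRequired := by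
          intro x hx
          by_contra hnx
          exact hex ⟨x, hx, hnx⟩
        have hncov : ¬ ∀ j : Fin 5, pvRequired.getD (j:Nat) "" ∈ ks := by
          intro hcov
          have hfalse := hB.mpr ⟨hsub, fun j => Or.inr (hcov j)⟩
          rw [hs] at hfalse
          exact Bool.true_eq_false.mp hfalse
        obtain ⟨j, hj⟩ := not_forall.mp hncov
        refine Bool.or_eq_true_iff.mpr (Or.inl ?_)
        simp only [List.any_eq_true, List.contains_eq_mem, Bool.not_eq_true',
          decide_eq_false_iff_not]
        refine ⟨pvRequired.getD (j:Nat) "", ?_, hj⟩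
        fin_cases j <;> decide

    simpa using hcond
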